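-- pv_equiv track=rewrite | github.com/covelant-AI/blockjam-ai | src/services/playground/racket_player_ball.py | find_false_sequences
-- ===== SOURCE A (Python) =====
-- def find_false_sequences(data, min_seconds, time_per_value):
--     """
--     Identify sequences of False values longer than min_seconds,
--     given each data point represents time_per_value seconds.
--
--     Parameters:
--     - data: list of bools
--     - min_seconds: int, minimum length in seconds of False sequence to consider
--     - time_per_value: int, number of seconds each data point represents
--
--     Returns:
--     - List of tuples (start_index, end_index) for False sequences
--     - Prints readable time ranges and total time saved
--     """
--     false_sequences = []
--     in_sequence = False
--     start_index = -1
--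
--     min_length = min_seconds // time_per_value
--
--     for i, value in enumerate(data):
--         if not value and not in_sequence:
--             in_sequence = True
--             start_index = i
--         elif value and in_sequence:
--             in_sequence = False
--             if i - start_index >= min_length:
--                 false_sequences.append((start_index, i - 1))
--             start_index = -1
--
--     # Handle case where sequence goes to end of list
--     if in_sequence and len(data) - start_index >= min_length:
--         false_sequences.append((start_index, len(data) - 1))
--
--     return false_sequences
-- ===== SOURCE B (Python) =====
-- def find_false_sequences(data, min_seconds, time_per_value):
--     min_length = min_seconds // time_per_value
--     starts = [i for i, (v, p) in enumerate(zip(data, [True] + data)) if not v and p]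
--     ends = [i for i, (v, nx) in enumerate(zip(data, data[1:] + [True])) if not v and nx]
--     return [(s, e) for s, e in zip(starts, ends) if e - s + 1 >= min_length]
-- ===== Notes on version B (the rewrite author's own statement) =====
-- stated objective: alternative
-- what changed: Replaced A's in_sequence/start_index state machine over enumerate(data) by boundary detection: two comprehensions over data zipped with its shifted copies find run starts (False whose predecessor is True/absent) and run ends (False whose successor is True/absent), then zip pairs them and a final filter keeps runs of length >= min_seconds//time_per_value.
import Mathlib
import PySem

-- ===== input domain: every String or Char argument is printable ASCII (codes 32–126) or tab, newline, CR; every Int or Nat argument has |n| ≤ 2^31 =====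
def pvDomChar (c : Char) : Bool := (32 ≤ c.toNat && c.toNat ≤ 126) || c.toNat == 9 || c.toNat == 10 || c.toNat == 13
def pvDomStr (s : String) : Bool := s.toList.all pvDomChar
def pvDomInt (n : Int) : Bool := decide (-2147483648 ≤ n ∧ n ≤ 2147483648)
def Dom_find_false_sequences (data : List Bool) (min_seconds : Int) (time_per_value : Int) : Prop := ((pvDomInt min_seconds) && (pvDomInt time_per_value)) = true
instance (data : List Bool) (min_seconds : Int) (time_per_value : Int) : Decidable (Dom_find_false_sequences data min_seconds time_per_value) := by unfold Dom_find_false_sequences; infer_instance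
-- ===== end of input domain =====

-- B replaces A's in_sequence/start_index state machine by boundary detection with shifted zips:
-- run starts and run ends are found by two comprehensions, paired by zip, then filtered by length.

-- ===== PORT A =====
-- one step of A's for-loop over enumerate(data); state = (false_sequences, in_sequence, start_index)
def ffsStepA (min_length : Int) (s : List (Int × Int) × Bool × Int) (p : Int × Bool) :
    List (Int × Int) × Bool × Int :=
  let fs := s.1; let inseq := s.2.1; let start := s.2.2
  let i := p.1; let value := p.2
  if !value && !inseq then (fs, true, i)
  else if value && inseq then
    ((if i - start ≥ min_length then fs ++ [(start, i - 1)] else fs), false, -1)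
  else s

def find_false_sequences (data : List Bool) (min_seconds : Int) (time_per_value : Int) : List (Int × Int) :=
  let min_length := PySem.Int.floordiv min_seconds time_per_value
  let st := (PySem.List.enumerate data 0).foldl (ffsStepA min_length) ([], false, -1)
  -- handle case where sequence goes to end of list
  if st.2.1 && decide ((data.length : Int) - st.2.2 ≥ min_length) then
    st.1 ++ [(st.2.2, (data.length : Int) - 1)]
  else st.1

-- ===== PORT B =====
def find_false_sequences_alt (data : List Bool) (min_seconds : Int) (time_per_value : Int) : List (Int × Int) :=
  let min_length := PySem.Int.floordiv min_seconds time_per_value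
  let starts := ((PySem.List.enumerate (data.zip (true :: data)) 0).filter
                  (fun x => !x.2.1 && x.2.2)).map (·.1)
  let ends := ((PySem.List.enumerate (data.zip (PySem.List.slice data (some 1) none ++ [true])) 0).filter
                  (fun x => !x.2.1 && x.2.2)).map (·.1)
  (starts.zip ends).filter (fun p => p.2 - p.1 + 1 ≥ min_length)

-- ===== PRECONDITION & SPEC =====
-- Pre_ excludes time_per_value = 0, on which A (and B) raise ZeroDivisionError.
def Pre_find_false_sequences (data : List Bool) (min_seconds : Int) (time_per_value : Int) : Prop :=
  time_per_value ≠ 0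
instance (data : List Bool) (min_seconds : Int) (time_per_value : Int) : Decidable (Pre_find_false_sequences data min_seconds time_per_value) := by unfold Pre_find_false_sequences; infer_instance
def pvWitness_find_false_sequences : List Bool × Int × Int := ([true, false, false, true, false], 2, 1)

def Spec_find_false_sequences (data : List Bool) (min_seconds : Int) (time_per_value : Int) (out : List (Int × Int)) : Prop := out = find_false_sequences_alt data min_seconds time_per_value
instance (data : List Bool) (min_seconds : Int) (time_per_value : Int) (out : List (Int × Int)) : Decidable (Spec_find_false_sequences data min_seconds time_per_value out) := by unfold Spec_find_false_sequences; infer_instance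

-- ===== CLAIM (what is proved, stated in full; the proofs are below) =====
def Claim_equal_find_false_sequences : Prop := ∀ (data : List Bool) (min_seconds : Int) (time_per_value : Int), Dom_find_false_sequences data min_seconds time_per_value → Pre_find_false_sequences data min_seconds time_per_value → Spec_find_false_sequences data min_seconds time_per_value (find_false_sequences data min_seconds time_per_value)

-- ===== LEMMAS AND PROOFS =====

-- length of the leading run of `false` and the rest of the list
def ffsSplitRun : List Bool → Nat × List Bool
  | false :: rest => let r := ffsSplitRun rest; (r.1 + 1, r.2)
  | l => (0, l)

theorem ffsSplitRun_len : ∀ l : List Bool, (ffsSplitRun l).2.length ≤ l.length := by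
  intro l
  induction l with
  | nil => simp [ffsSplitRun]
  | cons b rest ih => cases b <;> simp [ffsSplitRun] <;> omega

-- all maximal runs of False in l, as (start, end) index pairs, starting at index i
def ffsRuns (l : List Bool) (i : Int) : List (Int × Int) :=
  match h : l with
  | [] => []
  | true :: rest => ffsRuns rest (i + 1)
  | false :: rest =>
    let r := ffsSplitRun (false :: rest)
    (i, i + r.1 - 1) :: ffsRuns r.2 (i + r.1)
termination_by l.length
decreasing_by
  · simp
  · have := ffsSplitRun_len rest
    simp [ffsSplitRun] at *
    omega

-- recursive characterizations of B's two boundary comprehensions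
def bStarts : List Bool → Bool → Int → List Int
  | [], _, _ => []
  | b :: rest, prev, k => (if !b && prev then [k] else []) ++ bStarts rest b (k + 1)

def bEnds : List Bool → Int → List Int
  | [], _ => []
  | b :: rest, k => (if !b && rest.headD true then [k] else []) ++ bEnds rest (k + 1)

theorem bStarts_eq (l : List Bool) : ∀ (p : Bool) (k : Int),
    ((PySem.List.enumerate (l.zip (p :: l)) k).filter (fun x => !x.2.1 && x.2.2)).map (·.1)
      = bStarts l p k := by
  induction l with
  | nil => intro p k; simp [PySem.List.enumerate_nil, bStarts]
  | cons b rest ih =>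
    intro p k
    simp only [List.zip_cons_cons, PySem.List.enumerate_cons, List.filter_cons]
    cases hb : (!b && p) <;> simp [hb, bStarts, ih]

theorem bEnds_eq (l : List Bool) : ∀ (k : Int),
    ((PySem.List.enumerate (l.zip (l.drop 1 ++ [true])) k).filter (fun x => !x.2.1 && x.2.2)).map (·.1)
      = bEnds l k := by
  induction l with
  | nil => intro k; simp [PySem.List.enumerate_nil, bEnds]
  | cons b rest ih =>
    intro k
    cases rest with
    | nil =>
      simp only [List.drop_succ_cons, List.drop_nil, List.nil_append, List.zip_cons_cons,
        List.zip_nil_left, PySem.List.enumerate_cons, PySem.List.enumerate_nil, List.filter_cons]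
      cases hb : (!b && true) <;> simp [hb, bEnds]
    | cons b2 rest2 =>
      have h2 := ih (k + 1)
      simp only [List.drop_succ_cons, List.drop_zero] at h2
      cases b <;> cases b2 <;>
        simp [bEnds, PySem.List.enumerate_cons, List.headD, h2]

-- zipping starts with ends yields exactly the runs (mutual statement, strong induction on length)
theorem ffs_zip (n : Nat) : ∀ l : List Bool, l.length ≤ n →
    (∀ k : Int, (bStarts l true k).zip (bEnds l k) = ffsRuns l k) ∧
    (∀ (rest : List Bool), l = false :: rest → ∀ k s : Int,
      (s :: bStarts l false k).zip (bEnds l k)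
        = (s, k + ((ffsSplitRun l).1 : Int) - 1) :: ffsRuns (ffsSplitRun l).2 (k + (ffsSplitRun l).1)) := by
  induction n with
  | zero =>
    intro l hl
    have : l = [] := by cases l <;> simp_all
    subst this
    refine ⟨fun k => by simp [bStarts, bEnds, ffsRuns], fun rest h => by simp_all⟩
  | succ n ih =>
    intro l hl
    constructor
    · intro k
      match l with
      | [] => simp [bStarts, bEnds, ffsRuns]
      | true :: rest =>
        have h := (ih rest (by simp at hl; omega)).1 (k + 1)
        simp only [bStarts, bEnds, ffsRuns]
        simpa using h
      | false :: rest =>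
        match rest with
        | [] =>
          simp [bStarts, bEnds, ffsRuns, ffsSplitRun]
        | true :: rest2 =>
          have h := (ih rest2 (by simp at hl; omega)).1 (k + 2)
          simp only [bStarts, bEnds, ffsRuns, ffsSplitRun]
          simp [List.headD, show k + 1 + 1 = k + 2 by ring]
          ring_nf
          ring_nf at h
          exact h
        | false :: rest2 =>
          have h := (ih (false :: rest2) (by simp at hl; simp; omega)).2 rest2 rfl (k + 1) k
          simp only [bStarts, bEnds, ffsRuns, ffsSplitRun] at h ⊢
          simp [List.headD] at h ⊢
          ring_nf at h ⊢
          exact h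
    · rintro rest rfl k s
      match rest with
      | [] =>
        simp [bStarts, bEnds, ffsRuns, ffsSplitRun]
      | true :: rest2 =>
        have h := (ih rest2 (by simp at hl; omega)).1 (k + 2)
        simp only [bStarts, bEnds, ffsRuns, ffsSplitRun]
        simp [List.headD, show k + 1 + 1 = k + 2 by ring]
        ring_nf
        ring_nf at h
        exact h
      | false :: rest2 =>
        have h := (ih (false :: rest2) (by simp at hl; simp; omega)).2 rest2 rfl (k + 1) s
        simp only [bStarts, bEnds, ffsSplitRun] at h ⊢
        simp [List.headD] at h ⊢
        ring_nf at h ⊢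
        exact h
-- finalization of A's loop state at total length n
def ffsFin (min_length n : Int) (st : List (Int × Int) × Bool × Int) : List (Int × Int) :=
  if st.2.1 && decide (n - st.2.2 ≥ min_length) then st.1 ++ [(st.2.2, n - 1)] else st.1

-- run-at-a-time scan with the length filter applied on the fly (bridge between A and the runs view)
def ffsScan (min_length : Int) (l : List Bool) (i : Int) : List (Int × Int) :=
  match h : l with
  | [] => []
  | true :: rest => ffsScan min_length rest (i + 1)
  | false :: rest =>
    let r := ffsSplitRun (false :: rest)
    (if (r.1 : Int) ≥ min_length then [(i, i + r.1 - 1)] else []) ++ ffsScan min_length r.2 (i + r.1)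
termination_by l.length
decreasing_by
  · simp
  · have := ffsSplitRun_len rest
    simp [ffsSplitRun] at *
    omega

-- scanning with the filter on the fly = filtering the runs afterwards
theorem ffsScan_eq_filter (ml : Int) : ∀ (n : Nat) (l : List Bool), l.length ≤ n → ∀ k : Int,
    ffsScan ml l k = (ffsRuns l k).filter (fun p => decide (p.2 - p.1 + 1 ≥ ml)) := by
  intro n
  induction n with
  | zero =>
    intro l hl k
    have : l = [] := by cases l <;> simp_all
    subst this; simp [ffsScan, ffsRuns]
  | succ n ih =>
    intro l hl k
    match l with
    | [] => simp [ffsScan, ffsRuns]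
    | true :: rest =>
      rw [show ffsScan ml (true :: rest) k = ffsScan ml rest (k + 1) from by rw [ffsScan],
          show ffsRuns (true :: rest) k = ffsRuns rest (k + 1) from by rw [ffsRuns]]
      exact ih rest (by simp at hl; omega) (k + 1)
    | false :: rest =>
      rw [show ffsScan ml (false :: rest) k
            = (if ((ffsSplitRun (false :: rest)).1 : Int) ≥ ml
                then [(k, k + ((ffsSplitRun (false :: rest)).1 : Int) - 1)] else [])
              ++ ffsScan ml (ffsSplitRun (false :: rest)).2 (k + ((ffsSplitRun (false :: rest)).1 : Int))
            from by rw [ffsScan],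
          show ffsRuns (false :: rest) k
            = (k, k + ((ffsSplitRun (false :: rest)).1 : Int) - 1)
              :: ffsRuns (ffsSplitRun (false :: rest)).2 (k + ((ffsSplitRun (false :: rest)).1 : Int))
            from by rw [ffsRuns]]
      have hrec := ih (ffsSplitRun (false :: rest)).2
        (by have := ffsSplitRun_len rest; simp at hl; simp [ffsSplitRun]; omega)
        (k + ((ffsSplitRun (false :: rest)).1 : Int))
      rw [List.filter_cons, hrec]
      have harith : (decide (k + ((ffsSplitRun (false :: rest)).1 : Int) - 1 - k + 1 ≥ ml))
          = (decide (((ffsSplitRun (false :: rest)).1 : Int) ≥ ml)) := by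
        rw [decide_eq_decide]; omega
      simp only [harith]
      split_ifs <;> simp_all <;> omega

-- joint loop invariant: A's fold from index k, finalized at k + l.length, equals the filtered scan,
-- both when currently outside a run (state (fs, false, -1)) and inside a run started at s.
theorem ffs_loop (ml : Int) (l : List Bool) :
    (∀ (k : Int) (fs : List (Int × Int)),
      ffsFin ml (k + l.length) ((PySem.List.enumerate l k).foldl (ffsStepA ml) (fs, false, -1))
        = fs ++ ffsScan ml l k) ∧
    (∀ (k s : Int) (fs : List (Int × Int)),
      ffsFin ml (k + l.length) ((PySem.List.enumerate l k).foldl (ffsStepA ml) (fs, true, s))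
        = fs ++ (if ((k + (ffsSplitRun l).1) - s ≥ ml) then [(s, k + (ffsSplitRun l).1 - 1)] else [])
             ++ ffsScan ml (ffsSplitRun l).2 (k + (ffsSplitRun l).1)) := by
  induction l with
  | nil =>
    constructor
    · intro k fs; simp [PySem.List.enumerate_nil, ffsFin, ffsScan]
    · intro k s fs
      simp only [PySem.List.enumerate_nil, List.foldl_nil, ffsFin, ffsScan, ffsSplitRun]
      simp only [List.length_nil, Nat.cast_zero, add_zero]
      split_ifs <;> simp_all
  | cons b rest ih =>
    obtain ⟨ih1, ih2⟩ := ih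
    have hlen : ∀ k : Int, k + ((b :: rest).length : Int) = (k + 1) + (rest.length : Int) := by
      intro k; simp; ring
    constructor
    · intro k fs
      rw [PySem.List.enumerate_cons, List.foldl_cons, hlen]
      cases b with
      | true =>
        simp only [ffsStepA]; norm_num
        rw [ih1 (k + 1) fs, show ffsScan ml (true :: rest) k = ffsScan ml rest (k + 1) from by rw [ffsScan]]
      | false =>
        simp only [ffsStepA]; norm_num
        rw [ih2 (k + 1) k fs]
        rw [show ffsScan ml (false :: rest) k = (if (((ffsSplitRun (false :: rest)).1 : Int)) ≥ ml then [(k, k + ((ffsSplitRun (false :: rest)).1 : Int) - 1)] else []) ++ ffsScan ml (ffsSplitRun (false :: rest)).2 (k + ((ffsSplitRun (false :: rest)).1 : Int)) from by rw [ffsScan]]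
        simp only [ffsSplitRun]
        have e1 : k + 1 + ((ffsSplitRun rest).1 : Int) - k = (((ffsSplitRun rest).1 + 1 : Nat) : Int) := by push_cast; ring
        have e2 : k + 1 + ((ffsSplitRun rest).1 : Int) = k + (((ffsSplitRun rest).1 + 1 : Nat) : Int) := by push_cast; ring
        rw [e1, e2, List.append_assoc]
    · intro k s fs
      rw [PySem.List.enumerate_cons, List.foldl_cons, hlen]
      cases b with
      | true =>
        simp only [ffsStepA]; norm_num
        rw [ih1 (k + 1) (if ml ≤ k - s then fs ++ [(s, k - 1)] else fs)]
        rw [show ffsSplitRun (true :: rest) = (0, true :: rest) from rfl]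
        rw [show ffsScan ml (true :: rest) k = ffsScan ml rest (k + 1) from by rw [ffsScan]]
        split_ifs <;> simp
      | false =>
        simp only [ffsStepA]; norm_num
        rw [ih2 (k + 1) s fs]
        simp only [ffsSplitRun]
        have e1 : k + 1 + ((ffsSplitRun rest).1 : Int) - s = k + (((ffsSplitRun rest).1 + 1 : Nat) : Int) - s := by push_cast; ring
        have e2 : k + 1 + ((ffsSplitRun rest).1 : Int) = k + (((ffsSplitRun rest).1 + 1 : Nat) : Int) := by push_cast; ring
        rw [e1, e2]
        simp [List.append_assoc]

-- ===== VERDICT (by name: the statement is the Claim_ definition above) =====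
theorem find_false_sequences_spec : Claim_equal_find_false_sequences := by
  intro data min_seconds time_per_value _ _
  unfold Spec_find_false_sequences find_false_sequences find_false_sequences_alt
  set ml := PySem.Int.floordiv min_seconds time_per_value with hml
  -- A's side equals the filtered scan
  have hA := (ffs_loop ml data).1 0 []
  simp only [zero_add] at hA
  have hA' : (if ((PySem.List.enumerate data 0).foldl (ffsStepA ml) ([], false, -1)).2.1
        && decide ((data.length : Int) - ((PySem.List.enumerate data 0).foldl (ffsStepA ml) ([], false, -1)).2.2 ≥ ml)
      then ((PySem.List.enumerate data 0).foldl (ffsStepA ml) ([], false, -1)).1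
        ++ [(((PySem.List.enumerate data 0).foldl (ffsStepA ml) ([], false, -1)).2.2, (data.length : Int) - 1)]
      else ((PySem.List.enumerate data 0).foldl (ffsStepA ml) ([], false, -1)).1)
      = ffsScan ml data 0 := by simpa [ffsFin] using hA
  -- B's side equals the filtered runs
  have hstarts := bStarts_eq data true 0
  have hends := bEnds_eq data 0
  have hzip := (ffs_zip data.length data le_rfl).1 0
  have hfil := ffsScan_eq_filter ml data.length data le_rfl 0
  rw [hA', hfil]
  rw [PySem.List.slice_from_one]
  rw [show data.tail = data.drop 1 from (List.drop_one).symm]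
  rw [hstarts, hends]
  simp [hzip]
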